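-- pv_equiv track=rewrite | github.com/shashipal95/HR-Assistant-Chatbot | hr_logic.py | fix_column_names
-- ===== SOURCE A (Python) =====
-- def fix_column_names(sql):
--     replacements = {
--         "ManagerName": '"Manager Name"',
--         "Manager_Name": '"Manager Name"',
--         "PayRate": '"Pay Rate"',
--         "Pay_Rate": '"Pay Rate"',
--         "EmployeeName": '"Employee Name"',
--         "DateOfHire": '"Date of Hire"',
--         "DateOfTermination": '"Date of Termination"',
--         "PerformanceScore": '"Performance Score"',
--     }
--     for wrong, correct in replacements.items():
--         sql = sql.replace(wrong, correct)
--     return sql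
-- ===== SOURCE B (Python) =====
-- def fix_column_names(sql):
--     out = []
--     i, n = 0, len(sql)
--     while i < n:
--         c = sql[i]
--         if c == 'M':
--             if sql.startswith("ManagerName", i):
--                 out.append('"Manager Name"'); i += 11; continue
--             if sql.startswith("Manager_Name", i):
--                 out.append('"Manager Name"'); i += 12; continue
--         elif c == 'P':
--             if sql.startswith("PayRate", i):
--                 out.append('"Pay Rate"'); i += 7; continue
--             if sql.startswith("Pay_Rate", i):
--                 out.append('"Pay Rate"'); i += 8; continue
--             if sql.startswith("PerformanceScore", i):
--                 out.append('"Performance Score"'); i += 16; continue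
--         elif c == 'E':
--             if sql.startswith("EmployeeName", i):
--                 out.append('"Employee Name"'); i += 12; continue
--         elif c == 'D':
--             if sql.startswith("DateOfHire", i):
--                 out.append('"Date of Hire"'); i += 10; continue
--             if sql.startswith("DateOfTermination", i):
--                 out.append('"Date of Termination"'); i += 17; continue
--         out.append(c); i += 1
--     return "".join(out)
-- ===== Notes on version B (the rewrite author's own statement) =====
-- stated objective: alternative
-- what changed: Replaced A's eight sequential full-string replace passes by a single left-to-right scan that dispatches on the current character and substitutes the unique column-name key starting at that position (equivalent because no key occurs inside another key or inside any replacement value, and no replacement can create a new key occurrence).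
import Mathlib
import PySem

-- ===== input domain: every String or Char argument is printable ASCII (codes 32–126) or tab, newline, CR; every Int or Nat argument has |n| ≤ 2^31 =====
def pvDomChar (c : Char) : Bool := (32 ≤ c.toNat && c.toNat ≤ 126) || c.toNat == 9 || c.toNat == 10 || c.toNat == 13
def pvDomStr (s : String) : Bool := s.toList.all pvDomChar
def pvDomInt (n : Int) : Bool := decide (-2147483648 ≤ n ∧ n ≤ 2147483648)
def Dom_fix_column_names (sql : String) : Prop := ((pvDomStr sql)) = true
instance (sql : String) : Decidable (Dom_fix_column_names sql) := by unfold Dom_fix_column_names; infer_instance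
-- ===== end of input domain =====

-- B replaces A's eight full-string replace passes by ONE left-to-right scan that dispatches on the
-- current character and substitutes the unique column-name key starting there (objective: alternative).

-- ===== PORT A =====
-- the replacements dict, in insertion order (Python dict → association list)
def pvReplacements : List (String × String) :=
  [("ManagerName", "\"Manager Name\""),
   ("Manager_Name", "\"Manager Name\""),
   ("PayRate", "\"Pay Rate\""),
   ("Pay_Rate", "\"Pay Rate\""),
   ("EmployeeName", "\"Employee Name\""),
   ("DateOfHire", "\"Date of Hire\""),
   ("DateOfTermination", "\"Date of Termination\""),
   ("PerformanceScore", "\"Performance Score\"")]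

-- for wrong, correct in replacements.items(): sql = sql.replace(wrong, correct)
def fix_column_names (sql : String) : String :=
  pvReplacements.foldl (fun s p => PySem.Str.replace s p.1 p.2) sql

-- ===== PORT B =====
-- sql.startswith(key, i), on the rest of the character list from position i
def pvStarts (k : String) (l : List Char) : Bool := k.toList.isPrefixOf l

-- Source B's while-loop: dispatch on the current character, check the startswith chain of that
-- branch (appending the quoted name and skipping the key on a hit), else copy one character
def pvScanB : List Char → List Char
  | [] => []
  | c :: t =>
    if c = 'M' then
      if pvStarts "ManagerName" (c :: t) then "\"Manager Name\"".toList ++ pvScanB (t.drop 10)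
      else if pvStarts "Manager_Name" (c :: t) then "\"Manager Name\"".toList ++ pvScanB (t.drop 11)
      else c :: pvScanB t
    else if c = 'P' then
      if pvStarts "PayRate" (c :: t) then "\"Pay Rate\"".toList ++ pvScanB (t.drop 6)
      else if pvStarts "Pay_Rate" (c :: t) then "\"Pay Rate\"".toList ++ pvScanB (t.drop 7)
      else if pvStarts "PerformanceScore" (c :: t) then "\"Performance Score\"".toList ++ pvScanB (t.drop 15)
      else c :: pvScanB t
    else if c = 'E' then
      if pvStarts "EmployeeName" (c :: t) then "\"Employee Name\"".toList ++ pvScanB (t.drop 11)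
      else c :: pvScanB t
    else if c = 'D' then
      if pvStarts "DateOfHire" (c :: t) then "\"Date of Hire\"".toList ++ pvScanB (t.drop 9)
      else if pvStarts "DateOfTermination" (c :: t) then "\"Date of Termination\"".toList ++ pvScanB (t.drop 16)
      else c :: pvScanB t
    else c :: pvScanB t
termination_by l => l.length
decreasing_by all_goals (simp; try omega)

-- "".join(out) over the scanned pieces
def fix_column_names_alt (sql : String) : String :=
  String.ofList (pvScanB sql.toList)

-- ===== PRECONDITION & SPEC =====
def Spec_fix_column_names (sql : String) (out : String) : Prop := out = fix_column_names_alt sql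
instance (sql : String) (out : String) : Decidable (Spec_fix_column_names sql out) := by unfold Spec_fix_column_names; infer_instance

-- ===== CLAIM (what is proved, stated in full; the proofs are below) =====
def Claim_equal_fix_column_names : Prop := ∀ (sql : String), Dom_fix_column_names sql → Spec_fix_column_names sql (fix_column_names sql)

-- ===== LEMMAS AND PROOFS =====

-- the same dict items on the List Char level, used only by the proof
def pvKV : List (List Char × List Char) :=
  pvReplacements.map (fun p => (p.1.toList, p.2.toList))

-- reference scan: at each position substitute the first dict key matching there
def pvScan : List Char → List Char
  | [] => []
  | c :: t =>
    match pvKV.find? (fun p => p.1.isPrefixOf (c :: t)) with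
    | some p => p.2 ++ pvScan (t.drop (p.1.length - 1))
    | none => c :: pvScan t
termination_by l => l.length
decreasing_by
  · exact Nat.lt_succ_of_le (by simp)
  · simp

-- str.replace old new, on List Char, in structural form (equals PySem.Chars.replace for old ≠ [])
def pvRepl (k v : List Char) : List Char → List Char
  | [] => []
  | c :: t =>
    if k ≠ [] ∧ k.isPrefixOf (c :: t) then v ++ pvRepl k v (t.drop (k.length - 1))
    else c :: pvRepl k v t
termination_by l => l.length
decreasing_by
  · exact Nat.lt_succ_of_le (by simp)
  · simp

-- A's chain of replace passes, on List Char
def pvChain (Q : List (List Char × List Char)) (l : List Char) : List Char :=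
  Q.foldl (fun l p => pvRepl p.1 p.2 l) l

-- "no occurrence of k' can start inside u" (tail-independent sufficient condition)
abbrev pvPass (k' u : List Char) : Prop :=
  ∀ p < u.length, ¬ (u.drop p <+: k') ∧ ¬ (k' <+: u.drop p)

theorem pvRepl_go_eq (k v : List Char) (hk : k ≠ []) :
    ∀ fuel l acc, l.length ≤ fuel →
      PySem.Chars.replace.go k v fuel l acc = acc.reverse ++ pvRepl k v l := by
  intro fuel
  induction fuel with
  | zero =>
    intro l acc hl
    have : l = [] := List.eq_nil_of_length_eq_zero (Nat.le_zero.mp hl)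
    subst this
    simp [PySem.Chars.replace.go, pvRepl]
  | succ n ih =>
    intro l acc hl
    match l with
    | [] => simp [PySem.Chars.replace.go, pvRepl]
    | c :: t =>
      rw [PySem.Chars.replace.go]
      by_cases hp : k.isPrefixOf (c :: t)
      · rw [if_pos hp, ih _ _ (by
          have hk1 : 1 ≤ k.length := List.length_pos_iff.mpr hk
          simp only [List.length_drop, List.length_cons] at *
          omega)]
        rw [pvRepl, if_pos ⟨hk, hp⟩]
        have : List.drop k.length (c :: t) = t.drop (k.length - 1) := by
          cases k with
          | nil => exact absurd rfl hk
          | cons a k' => simp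
        simp [this]
      · rw [if_neg hp, ih _ _ (by simpa using Nat.le_of_succ_le_succ hl)]
        rw [pvRepl, if_neg (by simp [hp])]
        simp

theorem chars_replace_eq (s k v : List Char) (hk : k ≠ []) :
    PySem.Chars.replace s k v = pvRepl k v s := by
  rw [PySem.Chars.replace, if_neg (by simpa using hk)]
  simpa using pvRepl_go_eq k v hk s.length s [] le_rfl

-- pass-through: a replace pass does not touch a prefix u inside which no k-occurrence can start
theorem pvRepl_append (k v : List Char) : ∀ (u s : List Char), pvPass k u →
    pvRepl k v (u ++ s) = u ++ pvRepl k v s := by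
  intro u
  induction u with
  | nil => intro s h; simp
  | cons c u' ih =>
    intro s h
    have h0 := h 0 (by simp)
    simp only [List.drop_zero] at h0
    have hnp : ¬ k.isPrefixOf (c :: u' ++ s) := by
      rw [List.isPrefixOf_iff_prefix]
      intro hpre
      rcases List.prefix_or_prefix_of_prefix hpre (List.prefix_append (c :: u') s) with h1 | h1
      · exact h0.2 h1
      · exact h0.1 h1
    rw [List.cons_append, pvRepl, if_neg (by
      rintro ⟨-, hpre⟩
      exact hnp (by simpa [List.isPrefixOf_iff_prefix] using hpre))]
    rw [ih s (fun p hp => by simpa using h (p + 1) (by simpa using hp))]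
    simp

-- a replace pass whose value starts with '"' cannot create a new occurrence of a quote-free k'
theorem pvRepl_pres (k v k' : List Char) (hk : k ≠ []) (hv : v.head? = some '"')
    (hq : '"' ∉ k') :
    ∀ n (s : List Char), s.length ≤ n → ∀ w, k' <+: w ++ pvRepl k v s → k' <+: w ++ s := by
  intro n
  induction n with
  | zero =>
    intro s hs w
    have : s = [] := List.eq_nil_of_length_eq_zero (Nat.le_zero.mp hs)
    subst this; simp [pvRepl]
  | succ m ih =>
    intro s hs w hpre
    match s with
    | [] => simpa [pvRepl] using hpre
    | c :: t =>
      by_cases hp : k.isPrefixOf (c :: t)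
      · rw [pvRepl, if_pos ⟨hk, hp⟩] at hpre
        by_cases hle : k'.length ≤ w.length
        · have hw : k' <+: w := by
            rw [List.prefix_iff_eq_take] at hpre
            have heq : k' = List.take k'.length w :=
              hpre.trans (List.take_append_of_le_length hle)
            have h2 := List.take_prefix k'.length w
            rwa [← heq] at h2
          exact hw.trans (List.prefix_append w _)
        · have hlt : w.length < k'.length := Nat.lt_of_not_le hle
          exfalso
          apply hq
          have hvne : v ≠ [] := by intro hv0; subst hv0; simp at hv
          have := hpre.getElem (i := w.length) hlt
          rw [List.getElem_append_right (le_refl w.length)] at this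
          simp only [Nat.sub_self] at this
          have hv0 : (v ++ pvRepl k v (t.drop (k.length - 1)))[0]'(by
              simp only [List.length_append]
              have : 0 < v.length := List.length_pos_iff.mpr hvne
              omega) = '"' := by
            rw [List.getElem_append_left (List.length_pos_iff.mpr hvne)]
            rcases List.head?_eq_some_iff.mp hv with ⟨l', hvl⟩
            subst hvl; simp
          rw [hv0] at this
          exact this ▸ List.getElem_mem _
      · rw [pvRepl, if_neg (by simp [hp])] at hpre
        have : w ++ c :: pvRepl k v t = (w ++ [c]) ++ pvRepl k v t := by simp
        rw [this] at hpre
        have := ih t (by simpa using Nat.le_of_succ_le_succ hs) (w ++ [c]) hpre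
        simpa using this

theorem pvChain_append (Q : List (List Char × List Char)) (u : List Char)
    (h : ∀ p ∈ Q, pvPass p.1 u) :
    ∀ s, pvChain Q (u ++ s) = u ++ pvChain Q s := by
  induction Q with
  | nil => intro s; simp [pvChain]
  | cons q Q' ih =>
    intro s
    simp only [pvChain, List.foldl_cons]
    rw [pvRepl_append q.1 q.2 u s (h q (by simp))]
    exact ih (fun p hp => h p (by simp [hp])) _

theorem pvRepl_hit (k v s : List Char) (hk : k ≠ []) :
    pvRepl k v (k ++ s) = v ++ pvRepl k v s := by
  match k with
  | a :: k' =>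
    rw [List.cons_append, pvRepl, if_pos ⟨hk, by
      rw [List.isPrefixOf_iff_prefix]; exact List.prefix_append _ _⟩]
    simp

theorem pvChain_hit (P Q : List (List Char × List Char)) (k v s : List Char)
    (hk : k ≠ []) (hP : ∀ p ∈ P, pvPass p.1 k) (hQ : ∀ p ∈ Q, pvPass p.1 v) :
    pvChain (P ++ (k, v) :: Q) (k ++ s) = v ++ pvChain (P ++ (k, v) :: Q) s := by
  simp only [pvChain, List.foldl_append, List.foldl_cons]
  rw [show P.foldl (fun l p => pvRepl p.1 p.2 l) (k ++ s) = k ++ pvChain P s from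
    pvChain_append P k hP s]
  rw [pvRepl_hit k v (pvChain P s) hk]
  exact pvChain_append Q v hQ _

theorem pvChain_miss (Q : List (List Char × List Char))
    (hQ : ∀ p ∈ Q, p.1 ≠ [] ∧ p.2.head? = some '"' ∧ '"' ∉ p.1) (c : Char) :
    ∀ t, (∀ p ∈ Q, ¬ p.1 <+: c :: t) → pvChain Q (c :: t) = c :: pvChain Q t := by
  induction Q with
  | nil => intro t _; simp [pvChain]
  | cons q Q' ih =>
    intro t hnm
    simp only [pvChain, List.foldl_cons]
    have hq := hQ q (by simp)
    rw [pvRepl, if_neg (by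
      rintro ⟨-, hpre⟩
      exact hnm q (by simp) (List.isPrefixOf_iff_prefix.mp hpre))]
    have hnm' : ∀ p ∈ Q', ¬ p.1 <+: c :: pvRepl q.1 q.2 t := by
      intro p hp hpre
      have hpq := hQ p (by simp [hp])
      have := pvRepl_pres q.1 q.2 p.1 hq.1 hq.2.1 hpq.2.2 t.length t le_rfl [c]
        (by simpa using hpre)
      exact hnm p (by simp [hp]) (by simpa using this)
    have := ih (fun p hp => hQ p (by simp [hp])) (pvRepl q.1 q.2 t) hnm'
    simpa [pvChain] using this

-- concrete facts about the eight key/value pairs (checked by the kernel)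
theorem pvFact_shape : ∀ p ∈ pvKV, p.1 ≠ [] ∧ p.2.head? = some '"' ∧ '"' ∉ p.1 := by decide
theorem pvFact_keys : ∀ p ∈ pvKV, ∀ p' ∈ pvKV, p ≠ p' → pvPass p'.1 p.1 := by decide
theorem pvFact_vals : ∀ p ∈ pvKV, ∀ p' ∈ pvKV, pvPass p'.1 p.2 := by decide

theorem pvChain_nil (Q : List (List Char × List Char)) : pvChain Q [] = [] := by
  induction Q with
  | nil => rfl
  | cons q Q' ih => simpa [pvChain, pvRepl] using ih

theorem pvChain_eq_scan : ∀ n l, l.length ≤ n → pvChain pvKV l = pvScan l := by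
  intro n
  induction n with
  | zero =>
    intro l hl
    have : l = [] := List.eq_nil_of_length_eq_zero (Nat.le_zero.mp hl)
    subst this; rw [pvChain_nil, pvScan]
  | succ m ih =>
    intro l hl
    match l with
    | [] => rw [pvChain_nil, pvScan]
    | c :: t =>
      cases hfind : pvKV.find? (fun p => p.1.isPrefixOf (c :: t)) with
      | some q =>
        obtain ⟨hq, P, Q, hPQ, hP⟩ := List.find?_eq_some_iff_append.mp hfind
        have hqmem : q ∈ pvKV := by rw [hPQ]; simp
        have hqshape := pvFact_shape q hqmem
        obtain ⟨rest, hrest⟩ := List.isPrefixOf_iff_prefix.mp hq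
        have hkne : q.1 ≠ [] := hqshape.1
        have hPmem : ∀ p ∈ P, p ∈ pvKV := by intro p hp; rw [hPQ]; simp [hp]
        have hQmem : ∀ p ∈ Q, p ∈ pvKV := by intro p hp; rw [hPQ]; simp [hp]
        have hPpass : ∀ p ∈ P, pvPass p.1 q.1 := by
          intro p hp
          apply pvFact_keys q hqmem p (hPmem p hp)
          intro hqp
          have := hP p hp
          rw [← hqp] at this
          simp [hq] at this
        have hQpass : ∀ p ∈ Q, pvPass p.1 q.2 := fun p hp =>
          pvFact_vals q hqmem p (hQmem p hp)
        have hchain : pvChain pvKV (q.1 ++ rest) = q.2 ++ pvChain pvKV rest := by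
          rw [hPQ]
          exact pvChain_hit P Q q.1 q.2 rest hkne hPpass hQpass
        have hrest' : rest = t.drop (q.1.length - 1) := by
          cases hk : q.1 with
          | nil => exact absurd hk hkne
          | cons a k' =>
            rw [hk] at hrest
            have ht : t = k' ++ rest := by
              simp only [List.cons_append, List.cons.injEq] at hrest
              exact hrest.2.symm
            rw [ht]
            simp
        have hlen : rest.length ≤ m := by
          have h1 : t.length ≤ m := by simpa using Nat.le_of_succ_le_succ hl
          rw [hrest']
          exact le_trans (by simp) h1
        conv_lhs => rw [← hrest]
        rw [hchain, ih rest hlen]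
        conv_rhs => rw [pvScan.eq_def]
        simp only [hfind, ← hrest']
      | none =>
        have hnm : ∀ p ∈ pvKV, ¬ p.1 <+: c :: t := by
          intro p hp hpre
          have := List.find?_eq_none.mp hfind p hp
          simp [List.isPrefixOf_iff_prefix.mpr hpre] at this
        rw [pvChain_miss pvKV pvFact_shape c t hnm]
        rw [ih t (by simpa using Nat.le_of_succ_le_succ hl)]
        conv_rhs => rw [pvScan.eq_def]
        simp only [hfind]

theorem pvA_toList (sql : String) :
    (fix_column_names sql).toList = pvChain pvKV sql.toList := by
  simp only [fix_column_names, pvReplacements, pvKV, pvChain, List.foldl_cons,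
    List.foldl_nil, List.map_cons, List.map_nil, PySem.Str.toList_replace]
  rw [chars_replace_eq _ _ _ (by decide), chars_replace_eq _ _ _ (by decide),
    chars_replace_eq _ _ _ (by decide), chars_replace_eq _ _ _ (by decide),
    chars_replace_eq _ _ _ (by decide), chars_replace_eq _ _ _ (by decide),
    chars_replace_eq _ _ _ (by decide), chars_replace_eq _ _ _ (by decide)]

theorem scan_hit (c : Char) (t : List Char) (q : List Char × List Char)
    (hfind : pvKV.find? (fun p => p.1.isPrefixOf (c :: t)) = some q) :
    pvScan (c :: t) = q.2 ++ pvScan (t.drop (q.1.length - 1)) := by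
  rw [pvScan.eq_def]; simp only [hfind]

theorem scan_miss (c : Char) (t : List Char)
    (hfind : pvKV.find? (fun p => p.1.isPrefixOf (c :: t)) = none) :
    pvScan (c :: t) = c :: pvScan t := by
  rw [pvScan.eq_def]; simp only [hfind]

-- bridge: Source B's dispatching scan equals the reference scan
theorem pvScanB_eq_scan : ∀ n l, l.length ≤ n → pvScanB l = pvScan l := by
  intro n
  induction n with
  | zero =>
    intro l hl
    have : l = [] := List.eq_nil_of_length_eq_zero (Nat.le_zero.mp hl)
    subst this; rw [pvScanB, pvScan]
  | succ m ih =>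
    intro l hl
    match l with
    | [] => rw [pvScanB, pvScan]
    | c :: t =>
      have ht : t.length ≤ m := by simpa using Nat.le_of_succ_le_succ hl
      have ihd : ∀ j : Nat, pvScanB (t.drop j) = pvScan (t.drop j) := fun j =>
        ih (t.drop j) (le_trans (by simp) ht)
      rw [pvScanB.eq_def]
      dsimp only
      split_ifs with hM h1 h2 hP h3 h4 h5 hE h6 hD h7 h8
      all_goals simp only [pvStarts, Bool.not_eq_true] at *
      · -- hit ManagerName
        have hfind : pvKV.find? (fun p => p.1.isPrefixOf (c :: t)) = some ("ManagerName".toList, "\"Manager Name\"".toList) := by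
          simp only [pvKV, pvReplacements, List.map_cons, List.map_nil]
          rw [List.find?_cons_of_pos (by simpa using h1)]
        rw [scan_hit c t _ hfind,
          show "ManagerName".toList.length - 1 = 10 from by decide, ihd 10]
      · -- hit Manager_Name
        have hfind : pvKV.find? (fun p => p.1.isPrefixOf (c :: t)) = some ("Manager_Name".toList, "\"Manager Name\"".toList) := by
          simp only [pvKV, pvReplacements, List.map_cons, List.map_nil]
          rw [List.find?_cons_of_neg (by simp_all),
            List.find?_cons_of_pos (by simpa using h2)]
        rw [scan_hit c t _ hfind,
          show "Manager_Name".toList.length - 1 = 11 from by decide, ihd 11]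
      · -- miss ('M' branch)
        have hfind : pvKV.find? (fun p => p.1.isPrefixOf (c :: t)) = none := by
          simp only [pvKV, pvReplacements, List.map_cons, List.map_nil]
          rw [List.find?_cons_of_neg (by simp_all),
            List.find?_cons_of_neg (by simp_all),
            List.find?_cons_of_neg (by simp [hM]),
            List.find?_cons_of_neg (by simp [hM]),
            List.find?_cons_of_neg (by simp [hM]),
            List.find?_cons_of_neg (by simp [hM]),
            List.find?_cons_of_neg (by simp [hM]),
            List.find?_cons_of_neg (by simp [hM]),
            List.find?_nil]
        rw [scan_miss c t hfind, ih t ht]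
      · -- hit PayRate
        have hfind : pvKV.find? (fun p => p.1.isPrefixOf (c :: t)) = some ("PayRate".toList, "\"Pay Rate\"".toList) := by
          simp only [pvKV, pvReplacements, List.map_cons, List.map_nil]
          rw [List.find?_cons_of_neg (by simp [hP]),
            List.find?_cons_of_neg (by simp [hP]),
            List.find?_cons_of_pos (by simpa using h3)]
        rw [scan_hit c t _ hfind,
          show "PayRate".toList.length - 1 = 6 from by decide, ihd 6]
      · -- hit Pay_Rate
        have hfind : pvKV.find? (fun p => p.1.isPrefixOf (c :: t)) = some ("Pay_Rate".toList, "\"Pay Rate\"".toList) := by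
          simp only [pvKV, pvReplacements, List.map_cons, List.map_nil]
          rw [List.find?_cons_of_neg (by simp [hP]),
            List.find?_cons_of_neg (by simp [hP]),
            List.find?_cons_of_neg (by simp_all),
            List.find?_cons_of_pos (by simpa using h4)]
        rw [scan_hit c t _ hfind,
          show "Pay_Rate".toList.length - 1 = 7 from by decide, ihd 7]
      · -- hit PerformanceScore
        have hfind : pvKV.find? (fun p => p.1.isPrefixOf (c :: t)) = some ("PerformanceScore".toList, "\"Performance Score\"".toList) := by
          simp only [pvKV, pvReplacements, List.map_cons, List.map_nil]
          rw [List.find?_cons_of_neg (by simp [hP]),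
            List.find?_cons_of_neg (by simp [hP]),
            List.find?_cons_of_neg (by simp_all),
            List.find?_cons_of_neg (by simp_all),
            List.find?_cons_of_neg (by simp [hP]),
            List.find?_cons_of_neg (by simp [hP]),
            List.find?_cons_of_neg (by simp [hP]),
            List.find?_cons_of_pos (by simpa using h5)]
        rw [scan_hit c t _ hfind,
          show "PerformanceScore".toList.length - 1 = 15 from by decide, ihd 15]
      · -- miss ('P' branch)
        have hfind : pvKV.find? (fun p => p.1.isPrefixOf (c :: t)) = none := by
          simp only [pvKV, pvReplacements, List.map_cons, List.map_nil]
          rw [List.find?_cons_of_neg (by simp [hP]),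
            List.find?_cons_of_neg (by simp [hP]),
            List.find?_cons_of_neg (by simp_all),
            List.find?_cons_of_neg (by simp_all),
            List.find?_cons_of_neg (by simp [hP]),
            List.find?_cons_of_neg (by simp [hP]),
            List.find?_cons_of_neg (by simp [hP]),
            List.find?_cons_of_neg (by simp_all),
            List.find?_nil]
        rw [scan_miss c t hfind, ih t ht]
      · -- hit EmployeeName
        have hfind : pvKV.find? (fun p => p.1.isPrefixOf (c :: t)) = some ("EmployeeName".toList, "\"Employee Name\"".toList) := by
          simp only [pvKV, pvReplacements, List.map_cons, List.map_nil]
          rw [List.find?_cons_of_neg (by simp [hE]),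
            List.find?_cons_of_neg (by simp [hE]),
            List.find?_cons_of_neg (by simp [hE]),
            List.find?_cons_of_neg (by simp [hE]),
            List.find?_cons_of_pos (by simpa using h6)]
        rw [scan_hit c t _ hfind,
          show "EmployeeName".toList.length - 1 = 11 from by decide, ihd 11]
      · -- miss ('E' branch)
        have hfind : pvKV.find? (fun p => p.1.isPrefixOf (c :: t)) = none := by
          simp only [pvKV, pvReplacements, List.map_cons, List.map_nil]
          rw [List.find?_cons_of_neg (by simp [hE]),
            List.find?_cons_of_neg (by simp [hE]),
            List.find?_cons_of_neg (by simp [hE]),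
            List.find?_cons_of_neg (by simp [hE]),
            List.find?_cons_of_neg (by simp_all),
            List.find?_cons_of_neg (by simp [hE]),
            List.find?_cons_of_neg (by simp [hE]),
            List.find?_cons_of_neg (by simp [hE]),
            List.find?_nil]
        rw [scan_miss c t hfind, ih t ht]
      · -- hit DateOfHire
        have hfind : pvKV.find? (fun p => p.1.isPrefixOf (c :: t)) = some ("DateOfHire".toList, "\"Date of Hire\"".toList) := by
          simp only [pvKV, pvReplacements, List.map_cons, List.map_nil]
          rw [List.find?_cons_of_neg (by simp [hD]),
            List.find?_cons_of_neg (by simp [hD]),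
            List.find?_cons_of_neg (by simp [hD]),
            List.find?_cons_of_neg (by simp [hD]),
            List.find?_cons_of_neg (by simp [hD]),
            List.find?_cons_of_pos (by simpa using h7)]
        rw [scan_hit c t _ hfind,
          show "DateOfHire".toList.length - 1 = 9 from by decide, ihd 9]
      · -- hit DateOfTermination
        have hfind : pvKV.find? (fun p => p.1.isPrefixOf (c :: t)) = some ("DateOfTermination".toList, "\"Date of Termination\"".toList) := by
          simp only [pvKV, pvReplacements, List.map_cons, List.map_nil]
          rw [List.find?_cons_of_neg (by simp [hD]),
            List.find?_cons_of_neg (by simp [hD]),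
            List.find?_cons_of_neg (by simp [hD]),
            List.find?_cons_of_neg (by simp [hD]),
            List.find?_cons_of_neg (by simp [hD]),
            List.find?_cons_of_neg (by simp_all),
            List.find?_cons_of_pos (by simpa using h8)]
        rw [scan_hit c t _ hfind,
          show "DateOfTermination".toList.length - 1 = 16 from by decide, ihd 16]
      · -- miss ('D' branch)
        have hfind : pvKV.find? (fun p => p.1.isPrefixOf (c :: t)) = none := by
          simp only [pvKV, pvReplacements, List.map_cons, List.map_nil]
          rw [List.find?_cons_of_neg (by simp [hD]),
            List.find?_cons_of_neg (by simp [hD]),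
            List.find?_cons_of_neg (by simp [hD]),
            List.find?_cons_of_neg (by simp [hD]),
            List.find?_cons_of_neg (by simp [hD]),
            List.find?_cons_of_neg (by simp_all),
            List.find?_cons_of_neg (by simp_all),
            List.find?_cons_of_neg (by simp [hD]),
            List.find?_nil]
        rw [scan_miss c t hfind, ih t ht]
      · -- miss (other first character)
        have hM' : ¬ 'M' = c := fun h => hM h.symm
        have hP' : ¬ 'P' = c := fun h => hP h.symm
        have hE' : ¬ 'E' = c := fun h => hE h.symm
        have hD' : ¬ 'D' = c := fun h => hD h.symm
        have hfind : pvKV.find? (fun p => p.1.isPrefixOf (c :: t)) = none := by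
          simp only [pvKV, pvReplacements, List.map_cons, List.map_nil]
          rw [List.find?_cons_of_neg (by simp [hM']),
            List.find?_cons_of_neg (by simp [hM']),
            List.find?_cons_of_neg (by simp [hP']),
            List.find?_cons_of_neg (by simp [hP']),
            List.find?_cons_of_neg (by simp [hE']),
            List.find?_cons_of_neg (by simp [hD']),
            List.find?_cons_of_neg (by simp [hD']),
            List.find?_cons_of_neg (by simp [hP']),
            List.find?_nil]
        rw [scan_miss c t hfind, ih t ht]

-- ===== VERDICT (by name: the statement is the Claim_ definition above) =====
theorem fix_column_names_spec : Claim_equal_fix_column_names := by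
  intro sql _
  unfold Spec_fix_column_names fix_column_names_alt
  rw [← String.toList_inj, String.toList_ofList, pvA_toList,
    pvChain_eq_scan sql.toList.length _ le_rfl,
    pvScanB_eq_scan sql.toList.length _ le_rfl]
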